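-- pv_equiv track=rewrite | github.com/varuninaganti4598/CP-Varun | 05-happyprimes-Python/happyprimes.py | check
-- ===== SOURCE A (Python) =====
-- def check(n):
--     # if(isPrime(n)):
--         sum=0
--         while(1):
--             a=n%10
--             sum+=a*a
--             n=n//10
--             if(n==0):
--                 if(sum<10):
--                     return sum
--                 n=sum
--                 sum=0
-- ===== SOURCE B (Python) =====
-- # Answers for every value v <= 243 (iterated digit-square-sum until a single digit).
-- _TAB = [0, 1, 2, 3, 4, 5, 6, 7, 8, 9, 1, 2, 5, 1, 4, 4, 4, 4, 4, 1, 4, 5, 8, 1, 4, 4, 4, 4, 1, 4, 9, 1, 1, 4, 4, 4, 4, 4, 4, 4, 4, 4, 4, 4, 1, 4, 4, 4, 4, 1, 4, 4, 4, 4, 4, 4, 4, 4, 4, 4, 4, 4, 4, 4, 4, 4, 4, 4, 1, 4, 1, 4, 4, 4, 4, 4, 4, 4, 2, 1, 4, 4, 1, 4, 4, 4, 1, 2, 4, 4, 4, 1, 4, 4, 1, 4, 4, 1, 4, 4, 1, 2, 5, 1, 4, 4, 4, 4, 4, 1, 2, 3, 6, 2, 4, 4, 4, 4, 4, 4, 5,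 6, 9, 4, 5, 9, 4, 4, 4, 1, 1, 2, 4, 1, 4, 4, 4, 4, 4, 1, 4, 4, 5, 4, 4, 4, 4, 4, 4, 4, 4, 4, 9, 4, 4, 4, 4, 4, 4, 4, 4, 4, 4, 4, 4, 4, 4, 1, 2, 4, 4, 4, 4, 4, 4, 4, 1, 4, 4, 2, 4, 4, 4, 4, 4, 4, 2, 4, 1, 4, 1, 4, 1, 1, 4, 4, 4, 2, 4, 4, 4, 5, 8, 1, 4, 4, 4, 4, 1, 4, 5, 6, 9, 4, 5, 9, 4, 4, 4, 1, 8, 9, 5, 4, 4, 4, 1, 4, 4, 4, 1, 4, 4, 8, 4, 4, 1, 4, 4, 1, 4, 5, 4, 4]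
--
--
-- def _dss(x):
--     s = 0
--     while x > 0:
--         s += (x % 10) ** 2
--         x //= 10
--     return s
--
--
-- def check(n):
--     n = _dss(n)          # the digit-square-sum always runs at least once
--     while n > 243:       # any value with d >= 4 digits maps below 81*3 = 243 quickly
--         n = _dss(n)
--     return n if n < 10 else _TAB[n]
-- ===== Notes on version B (the rewrite author's own statement) =====
-- stated objective: alternative
-- what changed: Replaces A's unbounded iterate-until-single-digit loop by one digit-square-sum pass, a short reduction while the value exceeds 243 (the maximum digit-square-sum of any value below 1000), and an O(1) lookup in a precomputed 244-entry answer table; Pre_ excludes n < 0, where A's loop never terminates.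
import Mathlib
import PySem

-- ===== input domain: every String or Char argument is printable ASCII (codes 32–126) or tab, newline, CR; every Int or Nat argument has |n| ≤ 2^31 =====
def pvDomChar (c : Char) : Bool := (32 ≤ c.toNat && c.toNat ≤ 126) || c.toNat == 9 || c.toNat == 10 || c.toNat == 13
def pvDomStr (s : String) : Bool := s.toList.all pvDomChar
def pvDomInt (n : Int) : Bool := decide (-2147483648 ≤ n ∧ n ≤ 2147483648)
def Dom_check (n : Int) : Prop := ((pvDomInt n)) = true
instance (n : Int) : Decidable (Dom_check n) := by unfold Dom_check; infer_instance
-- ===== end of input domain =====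

-- B replaces A's unbounded iterate-until-single-digit loop by one digit-square-sum pass,
-- a short reduction while the value exceeds 243, and a precomputed 244-entry answer table.

-- ===== PORT A =====
-- A's while(1) loop, step for step; the fuel only makes the loop total
-- (proved sufficient on Dom_check ∧ Pre_check below; A never exhausts it there).
def checkGo (fuel : Nat) (n sum : Int) : Int :=
  match fuel with
  | 0 => 0
  | f + 1 =>
    let a := PySem.Int.mod n 10
    let sum2 := sum + a * a
    let n2 := PySem.Int.floordiv n 10
    if n2 = 0 then
      if sum2 < 10 then sum2 else checkGo f sum2 0
    else checkGo f n2 sum2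

def check (n : Int) : Int := checkGo ((n.toNat + 21) * 12) n 0

-- ===== PORT B =====
-- _TAB[k] = the single-digit answer for every k <= 243
def pvTab : List Int := [0, 1, 2, 3, 4, 5, 6, 7, 8, 9, 1, 2, 5, 1, 4, 4, 4, 4, 4, 1, 4, 5, 8, 1, 4, 4, 4, 4, 1, 4, 9, 1, 1, 4, 4, 4, 4, 4, 4, 4, 4, 4, 4, 4, 1, 4, 4, 4, 4, 1, 4, 4, 4, 4, 4, 4, 4, 4, 4, 4, 4, 4, 4, 4, 4, 4, 4, 4, 1, 4, 1, 4, 4, 4, 4, 4, 4, 4, 2, 1, 4, 4, 1, 4, 4, 4, 1, 2, 4, 4, 4, 1, 4, 4, 1, 4, 4, 1, 4, 4, 1, 2, 5, 1, 4, 4, 4, 4, 4, 1, 2, 3, 6, 2, 4, 4, 4, 4, 4, 4, 5, 6, 9, 4, 5, 9, 4, 4, 4, 1, 1, 2, 4, 1, 4, 4, 4, 4, 4, 1, 4, 4, 5, 4, 4, 4, 4, 4, 4, 4, 4, 4, 9, 4, 4, 4, 4, 4, 4, 4, 4, 4, 4, 4, 4, 4, 4, 1, 2, 4, 4, 4, 4,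 4, 4, 4, 1, 4, 4, 2, 4, 4, 4, 4, 4, 4, 2, 4, 1, 4, 1, 4, 1, 1, 4, 4, 4, 2, 4, 4, 4, 5, 8, 1, 4, 4, 4, 4, 1, 4, 5, 6, 9, 4, 5, 9, 4, 4, 4, 1, 8, 9, 5, 4, 4, 4, 1, 4, 4, 4, 1, 4, 4, 8, 4, 4, 1, 4, 4, 1, 4, 5, 4, 4]

-- helper _dss: while x > 0: s += (x % 10) ** 2; x //= 10
def dssGo (x s : Int) : Int :=
  if 0 < x then dssGo (PySem.Int.floordiv x 10) (s + (PySem.Int.mod x 10) ^ 2) else s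
termination_by x.toNat
decreasing_by
  have e : PySem.Int.floordiv x 10 = x / 10 := PySem.Int.floordiv_eq_ediv_of_pos (by norm_num)
  rw [e]; omega

def dss (x : Int) : Int := dssGo x 0

-- the 'while n > 243' reduction + final table lookup (fuel makes the loop total; the
-- loop-exit value satisfies 0 <= n <= 243 on every input B's loop reaches from Pre_,
-- so the plain getD index is exactly Python's _TAB[n])
def checkAltGo (fuel : Nat) (n : Int) : Int :=
  match fuel with
  | 0 => 0
  | f + 1 =>
    if 243 < n then checkAltGo f (dss n)
    else if n < 10 then n else pvTab.getD n.toNat 0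

def check_alt (n : Int) : Int := checkAltGo (n.toNat + 3) (dss n)

-- ===== PRECONDITION & SPEC =====
-- Pre_ excludes n < 0, on which A's while(1) loop never terminates (n//10 stays negative), so A returns nothing there.
def Pre_check (n : Int) : Prop := 0 ≤ n
instance (n : Int) : Decidable (Pre_check n) := by unfold Pre_check; infer_instance

def pvWitness_check : Int := 19

def Spec_check (n : Int) (out : Int) : Prop := out = check_alt n
instance (n : Int) (out : Int) : Decidable (Spec_check n out) := by unfold Spec_check; infer_instance

-- ===== CLAIM (what is proved, stated in full; the proofs are below) =====
def Claim_equal_check : Prop := ∀ (n : Int), Dom_check n → Pre_check n → Spec_check n (check n)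

-- ===== LEMMAS AND PROOFS =====

-- math model of the digit-square-sum, fuel-structural so that `decide` can evaluate it
def dssF : Nat → Nat → Nat
  | 0, _ => 0
  | f + 1, m => if m = 0 then 0 else (m % 10) ^ 2 + dssF f (m / 10)

def dssN (m : Nat) : Nat := dssF m m

theorem dssF_congr : ∀ m f g, m ≤ f → m ≤ g → dssF f m = dssF g m := by
  intro m
  induction m using Nat.strong_induction_on with
  | _ m ih =>
    intro f g hf hg
    match f, g with
    | 0, 0 => rfl
    | 0, g + 1 => interval_cases m; simp [dssF]
    | f + 1, 0 => interval_cases m; simp [dssF]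
    | f + 1, g + 1 =>
      by_cases hm : m = 0
      · simp [dssF, hm]
      · simp only [dssF, hm, if_false]
        have h10 : m / 10 < m := Nat.div_lt_self (Nat.pos_of_ne_zero hm) (by norm_num)
        rw [ih (m / 10) h10 f g (by omega) (by omega)]

theorem dssN_rec (m : Nat) (hm : m ≠ 0) : dssN m = (m % 10) ^ 2 + dssN (m / 10) := by
  obtain ⟨k, rfl⟩ : ∃ k, m = k + 1 := ⟨m - 1, by omega⟩
  show dssF (k + 1) (k + 1) = _
  simp only [dssF, hm, if_false]
  have h10 : (k + 1) / 10 < k + 1 := Nat.div_lt_self (by omega) (by norm_num)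
  rw [dssF_congr ((k + 1) / 10) k ((k + 1) / 10) (by omega) (le_refl _)]
  rfl

-- number of decimal digits (0 for m = 0)
def digitsN (m : Nat) : Nat :=
  if m = 0 then 0 else digitsN (m / 10) + 1
termination_by m
decreasing_by exact Nat.div_lt_self (Nat.pos_of_ne_zero (by omega)) (by norm_num)

theorem digitsN_rec (m : Nat) (hm : m ≠ 0) : digitsN m = digitsN (m / 10) + 1 := by
  rw [digitsN]; simp [hm]

theorem digitsN_le : ∀ k m, m < 10 ^ k → digitsN m ≤ k := by
  intro k
  induction k with
  | zero => intro m hm; interval_cases m; simp [digitsN]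
  | succ k ih =>
    intro m hm
    by_cases hm0 : m = 0
    · simp [hm0, digitsN]
    · rw [digitsN_rec m hm0]
      have : m / 10 < 10 ^ k := by
        rw [Nat.div_lt_iff_lt_mul (by norm_num)]
        calc m < 10 ^ (k + 1) := hm
        _ = 10 ^ k * 10 := by ring
      exact Nat.succ_le_succ (ih _ this)

theorem dssN_le_digits : ∀ m, dssN m ≤ 81 * digitsN m := by
  intro m
  induction m using Nat.strong_induction_on with
  | _ m ih =>
    by_cases hm : m = 0
    · simp [hm, dssN, dssF, digitsN]
    · rw [dssN_rec m hm, digitsN_rec m hm]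
      have h10 : m / 10 < m := Nat.div_lt_self (Nat.pos_of_ne_zero hm) (by norm_num)
      have h1 : (m % 10) ^ 2 ≤ 81 := by
        have : m % 10 ≤ 9 := by omega
        calc (m % 10) ^ 2 ≤ 9 ^ 2 := Nat.pow_le_pow_left this 2
        _ = 81 := by norm_num
      have h2 := ih (m / 10) h10
      omega

theorem dssN_small : ∀ m, m < 1000 → dssN m ≤ 243 := by
  intro m hm
  have h1 := dssN_le_digits m
  have h2 : digitsN m ≤ 3 := digitsN_le 3 m (by omega)
  omega

theorem dssN_lt : ∀ m, 1000 ≤ m → dssN m < m := by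
  intro m
  induction m using Nat.strong_induction_on with
  | _ m ih =>
    intro hm
    rw [dssN_rec m (by omega)]
    have h1 : (m % 10) ^ 2 ≤ 81 := by
      have : m % 10 ≤ 9 := by omega
      calc (m % 10) ^ 2 ≤ 9 ^ 2 := Nat.pow_le_pow_left this 2
      _ = 81 := by norm_num
    by_cases h : m / 10 < 1000
    · have h2 := dssN_small (m / 10) h
      omega
    · have h10 : m / 10 < m := Nat.div_lt_self (by omega) (by norm_num)
      have h2 := ih (m / 10) h10 (by omega)
      omega

-- A's orbit, Int-level (applies dss, stops below 10), fueled
def orbGo (fuel : Nat) (n : Int) : Int :=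
  match fuel with
  | 0 => 0
  | f + 1 =>
    let m := dss n
    if m < 10 then m else orbGo f m

-- Nat-level mirror of orbGo
def orbN : Nat → Nat → Nat
  | 0, _ => 0
  | f + 1, m => let v := dssN m; if v < 10 then v else orbN f v

-- the orbit from n terminates properly within the given number of passes
def okB : Nat → Nat → Bool
  | 0, _ => false
  | f + 1, n => decide (dssN n < 10) || okB f (dssN n)

theorem okB_mono : ∀ f g n, f ≤ g → okB f n = true → okB g n = true := by
  intro f
  induction f with
  | zero => intro g n _ h; simp [okB] at h
  | succ f ih =>
    intro g n hfg h
    obtain ⟨g', rfl⟩ : ∃ g', g = g' + 1 := ⟨g - 1, by omega⟩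
    simp only [okB, Bool.or_eq_true] at h ⊢
    rcases h with h | h
    · exact Or.inl h
    · exact Or.inr (ih g' (dssN n) (by omega) h)

set_option maxRecDepth 100000 in
theorem okB_243 : ∀ n, n ≤ 243 → okB 14 n = true := by decide

theorem okB_total : ∀ n, okB (n + 21) n = true := by
  intro n
  induction n using Nat.strong_induction_on with
  | _ n ih =>
    by_cases h : n ≤ 243
    · exact okB_mono 14 (n + 21) n (by omega) (okB_243 n h)
    · by_cases h2 : n < 1000
      · have hd : dssN n ≤ 243 := dssN_small n h2
        obtain ⟨k, hk⟩ : ∃ k, n + 21 = k + 1 := ⟨n + 20, rfl⟩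
        rw [hk]
        simp only [okB, Bool.or_eq_true]
        exact Or.inr (okB_mono 14 k (dssN n) (by omega) (okB_243 (dssN n) hd))
      · have hlt : dssN n < n := dssN_lt n (by omega)
        have hok : okB (dssN n + 21) (dssN n) := ih (dssN n) hlt
        obtain ⟨k, hk⟩ : ∃ k, n + 21 = k + 1 := ⟨n + 20, rfl⟩
        rw [hk]
        simp only [okB, Bool.or_eq_true]
        exact Or.inr (okB_mono (dssN n + 21) k (dssN n) (by omega) hok)

-- B's helper computes dssN
theorem dssGo_eq : ∀ m : Nat, ∀ s : Int, dssGo (↑m) s = s + ↑(dssN m) := by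
  intro m
  induction m using Nat.strong_induction_on with
  | _ m ih =>
    intro s
    by_cases hm : m = 0
    · subst hm
      rw [dssGo]
      norm_num [dssN, dssF]
    · rw [dssGo]
      have hpos : (0 : Int) < ↑m := by exact_mod_cast Nat.pos_of_ne_zero hm
      have hfd : PySem.Int.floordiv (↑m) 10 = ↑(m / 10) := by
        exact_mod_cast PySem.Int.floordiv_natCast m 10
      have hmd : PySem.Int.mod (↑m) 10 = ↑(m % 10) := by
        exact_mod_cast PySem.Int.mod_natCast m 10
      rw [if_pos hpos, hfd, hmd]
      rw [ih (m / 10) (Nat.div_lt_self (Nat.pos_of_ne_zero hm) (by norm_num))]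
      rw [dssN_rec m hm]
      push_cast
      ring

theorem dss_natCast (m : Nat) : dss (↑m) = ↑(dssN m) := by
  show dssGo (↑m) 0 = _
  rw [dssGo_eq m 0]; ring

-- one pass of A's fused loop equals adding dssN m to the accumulator
theorem checkGo_pass : ∀ m : Nat, 0 < m → ∀ (f : Nat) (s : Int),
    checkGo (digitsN m + f) (↑m) s =
      (if s + ↑(dssN m) < 10 then s + ↑(dssN m) else checkGo f (s + ↑(dssN m)) 0) := by
  intro m
  induction m using Nat.strong_induction_on with
  | _ m ih =>
    intro hm f s
    rw [digitsN_rec m (by omega)]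
    have hstep : digitsN (m / 10) + 1 + f = (digitsN (m / 10) + f) + 1 := by omega
    rw [hstep]
    have hfd : PySem.Int.floordiv (↑m) 10 = ↑(m / 10) := by
      exact_mod_cast PySem.Int.floordiv_natCast m 10
    have hmd : PySem.Int.mod (↑m) 10 = ↑(m % 10) := by
      exact_mod_cast PySem.Int.mod_natCast m 10
    show checkGo ((digitsN (m / 10) + f) + 1) (↑m) s = _
    simp only [checkGo, hfd, hmd]
    have hsum : s + (↑(m % 10) : Int) * ↑(m % 10) + ↑(dssN (m / 10)) = s + ↑(dssN m) := by
      rw [dssN_rec m (by omega)]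
      push_cast
      ring
    by_cases h10 : m / 10 = 0
    · rw [h10]
      simp only [Nat.cast_zero]
      have : s + (↑(m % 10) : Int) * ↑(m % 10) = s + ↑(dssN m) := by
        rw [dssN_rec m (by omega), h10]
        norm_num [dssN, dssF]
        ring
      rw [this]
      simp [digitsN]
    · rw [if_neg (show ¬((↑(m / 10) : Int) = 0) by exact_mod_cast h10)]
      rw [ih (m / 10) (Nat.div_lt_self (by omega) (by norm_num)) (Nat.pos_of_ne_zero h10)
          f (s + (↑(m % 10) : Int) * ↑(m % 10))]
      rw [hsum]

-- main simulation: with enough fuel A's fused loop equals the orbit loop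
theorem main_sim : ∀ k, ∀ m : Nat, 0 < m → m < 10 ^ 11 → okB k m = true → ∀ f g,
    checkGo (12 * k + f) (↑m) 0 = orbGo (k + g) (↑m) := by
  intro k
  induction k with
  | zero => intro m _ _ h; simp [okB] at h
  | succ k ih =>
    intro m hm hlt hok f g
    have hd : digitsN m ≤ 11 := digitsN_le 11 m hlt
    have hfuel : 12 * (k + 1) + f = digitsN m + (12 * k + (f + 12 - digitsN m)) := by omega
    rw [hfuel, checkGo_pass m hm (12 * k + (f + 12 - digitsN m)) 0]
    have hgg : k + 1 + g = (k + g) + 1 := by omega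
    rw [hgg]
    show _ = (let mm := dss (↑m); if mm < 10 then mm else orbGo (k + g) mm)
    simp only [dss_natCast m]
    have hz : (0 : Int) + ↑(dssN m) = ↑(dssN m) := by ring
    rw [hz]
    by_cases ht : dssN m < 10
    · rw [if_pos (by exact_mod_cast ht), if_pos (by exact_mod_cast ht)]
    · rw [if_neg (by exact_mod_cast ht), if_neg (by exact_mod_cast ht)]
      simp only [okB, Bool.or_eq_true, decide_eq_true_eq] at hok
      have hok' : okB k (dssN m) = true := by tauto
      have hpos : 0 < dssN m := by omega
      have hsmall : dssN m < 10 ^ 11 := by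
        have h1 := dssN_le_digits m
        have : 81 * digitsN m ≤ 81 * 11 := by omega
        omega
      exact ih (dssN m) hpos hsmall hok' (f + 12 - digitsN m) g

theorem orbGo_natCast : ∀ f (m : Nat), orbGo f (↑m) = ↑(orbN f m) := by
  intro f
  induction f with
  | zero => intro m; rfl
  | succ f ih =>
    intro m
    show (let mm := dss ↑m; if mm < 10 then mm else orbGo f mm) = _
    simp only [dss_natCast m]
    by_cases h : dssN m < 10
    · rw [if_pos (by exact_mod_cast h)]
      show _ = (↑(if dssN m < 10 then dssN m else orbN f (dssN m)) : Int)
      rw [if_pos h]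
    · rw [if_neg (by exact_mod_cast h), ih (dssN m)]
      show _ = (↑(if dssN m < 10 then dssN m else orbN f (dssN m)) : Int)
      rw [if_neg h]

theorem orbN_mono : ∀ f g n, f ≤ g → okB f n = true → orbN g n = orbN f n := by
  intro f
  induction f with
  | zero => intro g n _ h; simp [okB] at h
  | succ f ih =>
    intro g n hfg h
    obtain ⟨g', rfl⟩ : ∃ g', g = g' + 1 := ⟨g - 1, by omega⟩
    simp only [okB, Bool.or_eq_true, decide_eq_true_eq] at h
    show (if dssN n < 10 then dssN n else orbN g' (dssN n)) =
         (if dssN n < 10 then dssN n else orbN f (dssN n))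
    by_cases hv : dssN n < 10
    · rw [if_pos hv, if_pos hv]
    · rw [if_neg hv, if_neg hv]
      exact ih g' (dssN n) (by omega) (by tauto)

-- the table is correct: for 10 <= v <= 243, the orbit answer from v is pvTab[v]
set_option maxRecDepth 1000000 in
theorem tab_ok : ∀ v : Nat, v < 244 → 10 ≤ v → pvTab.getD v 0 = ↑(orbN 14 v) := by decide

-- B's loop equals the orbit answer, for start values bounded by one dss pass on Dom
theorem alt_sim (m : Nat) (hm : 2 ≤ m) (hv : dssN m ≤ 810) :
    checkAltGo (m + 3) (↑(dssN m)) = ↑(orbN (m + 21) m) := by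
  have hstep : ∀ (v : Nat) (f : Nat), v ≤ 243 →
      checkAltGo (f + 1) (↑v) = (if v < 10 then (↑v : Int) else pvTab.getD v 0) := by
    intro v f hvle
    show (if 243 < (↑v : Int) then checkAltGo f (dss ↑v)
          else if (↑v : Int) < 10 then ↑v else pvTab.getD (↑v : Int).toNat 0) = _
    rw [if_neg (by exact_mod_cast Nat.not_lt.mpr hvle)]
    by_cases h : v < 10
    · rw [if_pos (by exact_mod_cast h), if_pos h]
    · rw [if_neg (by exact_mod_cast h), if_neg h, Int.toNat_natCast]
  set v := dssN m with hvdef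
  have horb : orbN (m + 21) m = if v < 10 then v else orbN (m + 20) v := rfl
  by_cases h10 : v < 10
  · rw [horb, if_pos h10]
    obtain ⟨f, hf⟩ : ∃ f, m + 3 = f + 1 := ⟨m + 2, rfl⟩
    rw [hf, hstep v f (by omega), if_pos h10]
  · rw [horb, if_neg h10]
    by_cases h243 : v ≤ 243
    · obtain ⟨f, hf⟩ : ∃ f, m + 3 = f + 1 := ⟨m + 2, rfl⟩
      rw [hf, hstep v f h243, if_neg h10]
      rw [orbN_mono 14 (m + 20) v (by omega) (okB_243 v (by omega))]
      exact tab_ok v (by omega) (by omega)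
    · -- 243 < v <= 810: one loop iteration, then w = dssN v <= 243
      have hw : dssN v ≤ 243 := dssN_small v (by omega)
      show checkAltGo (m + 3) (↑v) = _
      obtain ⟨f, hf⟩ : ∃ f, m + 3 = f + 2 := ⟨m + 1, rfl⟩
      rw [hf]
      show (if 243 < (↑v : Int) then checkAltGo (f + 1) (dss ↑v)
            else if (↑v : Int) < 10 then ↑v else pvTab.getD (↑v : Int).toNat 0) = _
      rw [if_pos (by exact_mod_cast Nat.lt_of_not_le h243), dss_natCast v]
      rw [hstep (dssN v) f hw]
      have horb2 : orbN (m + 20) v = if dssN v < 10 then dssN v else orbN (m + 19) (dssN v) := rfl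
      rw [horb2]
      by_cases hw10 : dssN v < 10
      · rw [if_pos hw10, if_pos hw10]
      · rw [if_neg hw10, if_neg hw10]
        rw [orbN_mono 14 (m + 19) (dssN v) (by omega) (okB_243 (dssN v) (by omega))]
        exact tab_ok (dssN v) (by omega) (by omega)

-- ===== VERDICT (by name: the statement is the Claim_ definition above) =====
theorem check_spec : Claim_equal_check := by
  intro n hdom hpre
  unfold Spec_check check check_alt
  have hn : (↑n.toNat : Int) = n := Int.toNat_of_nonneg hpre
  by_cases hsmall : n.toNat < 2
  · rw [← hn, dss_natCast]
    interval_cases h : n.toNat <;> decide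
  · have hdom' : n.toNat < 10 ^ 10 := by
      unfold Dom_check pvDomInt at hdom
      simp only [decide_eq_true_eq] at hdom
      omega
    set m := n.toNat with hm
    have hA := main_sim (m + 21) m (by omega) (by omega) (okB_total m) 0 0
    rw [hn] at hA
    have hv : dssN m ≤ 810 := by
      have h1 := dssN_le_digits m
      have h2 : digitsN m ≤ 10 := digitsN_le 10 m (by omega)
      omega
    have hB : checkAltGo (m + 3) (dss n) = ↑(orbN (m + 21) m) := by
      rw [← hn, dss_natCast m]
      exact alt_sim m (by omega) hv
    calc checkGo ((m + 21) * 12) n 0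
        = checkGo (12 * (m + 21) + 0) n 0 := by ring_nf
      _ = orbGo (m + 21 + 0) n := hA
      _ = orbGo (m + 21) n := by ring_nf
      _ = ↑(orbN (m + 21) m) := by rw [← hn, orbGo_natCast]
      _ = checkAltGo (m + 3) (dss n) := hB.symm
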